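-- pv_equiv track=rewrite | github.com/cjswo672/Algorithm_python | programmers/자동완성.py | solution
-- ===== SOURCE A (Python) =====
-- def solution(words):
--     class Trie:
--         def __init__(self):
--             self.child = {}
--             self.has_others = False
--             self.terminate = False
--
--     root, answer = Trie(), 0
--
--     for word in words:  # Make Trie
--         runner = root
--         for w in word:
--             if w in runner.child:
--                 runner.child[w].has_others = True
--             else: runner.child[w] = Trie()
--             runner = runner.child[w]
--         runner.terminate = True
--
--     for word in words:  # Query word
--         runner = root
--         for i, w in enumerate(word):
--             runner = runner.child[w]
--             if not runner.has_others:
--                 answer += i + 1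
--                 break
--         else: answer += len(word)
--
--     return answer
-- ===== SOURCE B (Python) =====
-- def solution(words):
--     def lcp(a, b):
--         n = 0
--         while n < len(a) and n < len(b) and a[n] == b[n]:
--             n += 1
--         return n
--
--     s = sorted(words)
--     adj = [lcp(a, b) for a, b in zip(s, s[1:])]
--     total = 0
--     for w, best in zip(s, map(max, [0] + adj, adj + [0])):
--         total += min(len(w), best + 1)
--     return total
-- ===== Notes on version B (the rewrite author's own statement) =====
-- stated objective: alternative
-- what changed: Replaces the trie (nested dicts with has_others flags, built then walked per word) with sort + one adjacent-pair sweep: sort the words, compute each adjacent pair's LCP, and add min(len(word), max(LCP with prev, LCP with next) + 1) per word.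
import Mathlib
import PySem

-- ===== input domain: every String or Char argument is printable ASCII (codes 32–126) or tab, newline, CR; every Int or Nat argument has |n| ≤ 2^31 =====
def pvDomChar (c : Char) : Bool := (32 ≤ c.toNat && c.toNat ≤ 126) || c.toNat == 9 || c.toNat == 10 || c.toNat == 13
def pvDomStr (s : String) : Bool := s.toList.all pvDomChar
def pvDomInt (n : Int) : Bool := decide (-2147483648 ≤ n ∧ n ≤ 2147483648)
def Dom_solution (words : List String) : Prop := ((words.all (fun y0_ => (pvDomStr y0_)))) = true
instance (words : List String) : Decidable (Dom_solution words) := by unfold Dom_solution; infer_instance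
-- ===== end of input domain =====

-- B replaces A's trie with sort + one adjacent-pair LCP sweep (alternative algorithm, same exact results).

-- ===== PORT A =====
-- A's Trie of nested dicts is encoded as one PySem.Dict keyed by the node's path from the
-- root (each node is its unique char-path), value = its has_others flag; `w in runner.child`
-- is `contains (path ++ [c])`. The `terminate` flag is written by A but never read, so it is
-- not part of the encoding. This is a step-for-step hand port of A's two loops.
def trieInsert (d : PySem.Dict (List Char) Bool) (path : List Char) (cs : List Char) :
    PySem.Dict (List Char) Bool :=
  match cs with
  | [] => d
  | c :: rest =>
      let p := path ++ [c]
      let d' := if d.contains p then d.insert p true else d.insert p false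
      trieInsert d' p rest

def trieBuild (ws : List (List Char)) : PySem.Dict (List Char) Bool :=
  ws.foldl (fun d w => trieInsert d [] w) PySem.Dict.empty

-- the query loop over one word: i counts consumed chars, `break` returns i+1, for-else returns len
def trieQuery (d : PySem.Dict (List Char) Bool) (path : List Char) (i : Nat) (cs : List Char) : Nat :=
  match cs with
  | [] => i
  | c :: rest =>
      let p := path ++ [c]
      if d.getD p false then trieQuery d p (i + 1) rest else i + 1

def solution (words : List String) : Int :=
  let root := trieBuild (words.map String.toList)
  ((words.foldl (fun acc w => acc + trieQuery root [] 0 w.toList) 0 : Nat) : Int)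

-- ===== PORT B =====
-- Source B's lcp: walk the two words from the front while the chars agree
def lcpLen (a b : List Char) : Nat :=
  match a, b with
  | x :: a', y :: b' => if x = y then lcpLen a' b' + 1 else 0
  | _, _ => 0

-- Source B: adj = [lcp(a, b) for a, b in zip(s, s[1:])]  (s[1:] is the tail of s)
def adjLcps (s : List String) : List Nat :=
  (s.zip s.tail).map (fun p => lcpLen p.1.toList p.2.toList)

def solution_alt (words : List String) : Int :=
  let s := PySem.List.sorted words (fun x => x) false
  let adj := adjLcps s
  (((s.zip (List.zipWith max (0 :: adj) (adj ++ [0]))).foldl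
      (fun total p => total + min p.1.toList.length (p.2 + 1)) 0 : Nat) : Int)

-- ===== PRECONDITION & SPEC =====
def Spec_solution (words : List String) (out : Int) : Prop := out = solution_alt words
instance (words : List String) (out : Int) : Decidable (Spec_solution words out) := by unfold Spec_solution; infer_instance

-- ===== CLAIM (what is proved, stated in full; the proofs are below) =====
def Claim_equal_solution : Prop := ∀ (words : List String), Dom_solution words → Spec_solution words (solution words)

-- ===== LEMMAS AND PROOFS =====

-- number of words having p as a prefix
def cntPre (p : List Char) (ws : List (List Char)) : Nat := ws.countP (fun w => p.isPrefixOf w)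

-- max LCP of w against a plain list of words
def bestNat (w : List Char) (others : List (List Char)) : Nat :=
  others.foldl (fun b v => max b (lcpLen w v)) 0

-- --- trieInsert touches exactly the keys path ++ (nonempty prefix of cs) ---
lemma append_ne_self (u v : List Char) (hv : v ≠ []) : u ++ v ≠ u := by
  intro h
  have := congrArg List.length h
  simp only [List.length_append] at this
  exact hv (List.length_eq_zero_iff.mp (by omega))

lemma take_succ_ne_nil (rest : List Char) (k : Nat) (hk : k < rest.length) :
    rest.take (k + 1) ≠ [] := by
  intro hnil
  rw [List.take_eq_nil_iff] at hnil
  rcases hnil with h | h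
  · omega
  · subst h; simp at hk

lemma trieInsert_get?_of_not (cs : List Char) (d : PySem.Dict (List Char) Bool)
    (path q : List Char) (h : ∀ k, k < cs.length → q ≠ path ++ cs.take (k + 1)) :
    (trieInsert d path cs).get? q = d.get? q := by
  induction cs generalizing d path with
  | nil => rfl
  | cons c rest ih =>
    have h0 : q ≠ path ++ [c] := by simpa using h 0 (by simp)
    have hrec : ∀ k, k < rest.length → q ≠ (path ++ [c]) ++ rest.take (k + 1) := by
      intro k hk
      simpa [List.append_assoc] using h (k + 1) (by simp; omega)
    show (trieInsert (if d.contains (path ++ [c]) then d.insert (path ++ [c]) true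
        else d.insert (path ++ [c]) false) (path ++ [c]) rest).get? q = d.get? q
    rw [ih _ _ hrec]
    split <;> rw [PySem.Dict.get?_insert_of_ne _ _ h0]

lemma trieInsert_get?_of_prefix (cs : List Char) (d : PySem.Dict (List Char) Bool)
    (path : List Char) (k : Nat) (hk : k < cs.length) :
    (trieInsert d path cs).get? (path ++ cs.take (k + 1)) =
      some (d.contains (path ++ cs.take (k + 1))) := by
  induction cs generalizing d path k with
  | nil => simp at hk
  | cons c rest ih =>
    show (trieInsert (if d.contains (path ++ [c]) then d.insert (path ++ [c]) true
        else d.insert (path ++ [c]) false) (path ++ [c]) rest).get? _ = _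
    cases k with
    | zero =>
      simp only [List.take_succ_cons, List.take_zero]
      rw [trieInsert_get?_of_not]
      · split
        next hc => rw [PySem.Dict.get?_insert_self, hc]
        next hc => rw [PySem.Dict.get?_insert_self]; simp at hc; simp [hc]
      · intro k hk heq
        exact append_ne_self _ _ (take_succ_ne_nil rest k hk) heq.symm
    | succ k' =>
      have hk' : k' < rest.length := by simpa using hk
      have hsplit : path ++ (c :: rest).take (k' + 1 + 1) = (path ++ [c]) ++ rest.take (k' + 1) := by
        simp [List.append_assoc]
      rw [hsplit, ih _ _ _ hk']
      have hne : (path ++ [c]) ++ rest.take (k' + 1) ≠ path ++ [c] := by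
        intro heq
        exact append_ne_self _ _ (take_succ_ne_nil rest k' hk') heq
      have hbeq : (((path ++ [c]) ++ rest.take (k' + 1)) == (path ++ [c])) = false :=
        beq_eq_false_iff_ne.mpr hne
      split <;> rw [PySem.Dict.contains_insert, hbeq] <;> simp

-- --- the built trie: a nonempty prefix key q stores "at least two words pass through q" ---
lemma buildFrom_get? (ws : List (List Char)) (d : PySem.Dict (List Char) Bool)
    (q : List Char) (hq : q ≠ []) :
    (ws.foldl (fun d w => trieInsert d [] w) d).get? q =
      if cntPre q ws = 0 then d.get? q else some (d.contains q || decide (2 ≤ cntPre q ws)) := by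
  induction ws generalizing d with
  | nil => simp [cntPre]
  | cons w rest ih =>
    have hcnt : cntPre q (w :: rest) = cntPre q rest + if q.isPrefixOf w then 1 else 0 := by
      simp [cntPre, List.countP_cons]
    simp only [List.foldl_cons]
    rw [ih]
    by_cases hp : q.isPrefixOf w
    · have hpre : q <+: w := List.isPrefixOf_iff_prefix.mp hp
      have hqlen : 0 < q.length := by
        cases q with
        | nil => exact absurd rfl hq
        | cons a t => simp
      have hqw : q.length ≤ w.length := hpre.length_le
      have hkq : q.length - 1 < w.length := by omega
      have htake : ([] : List Char) ++ w.take (q.length - 1 + 1) = q := by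
        have := List.prefix_iff_eq_take.mp hpre
        simp only [List.nil_append]
        rw [Nat.sub_add_cancel hqlen]
        exact this.symm
      have hget : (trieInsert d [] w).get? q = some (d.contains q) := by
        have := trieInsert_get?_of_prefix w d [] (q.length - 1) hkq
        rwa [htake] at this
      have hcont : (trieInsert d [] w).contains q = true := by
        rw [PySem.Dict.contains_eq_isSome_get?, hget]; rfl
      rw [hget, hcont, hcnt]
      simp only [hp, if_true]
      by_cases h0 : cntPre q rest = 0
      · simp [h0]
      · have h1 : ¬ (cntPre q rest + 1 = 0) := by omega
        have h2 : (2 ≤ cntPre q rest + 1) := by omega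
        simp [h0, h2]
    · have hnp : ∀ k, k < w.length → q ≠ ([] : List Char) ++ w.take (k + 1) := by
        intro k hk heq
        apply hp
        rw [List.isPrefixOf_iff_prefix]
        exact heq ▸ (by simpa using (List.take_prefix (k + 1) w))
      have hget : (trieInsert d [] w).get? q = d.get? q := trieInsert_get?_of_not w d [] q hnp
      have hcont : (trieInsert d [] w).contains q = d.contains q := by
        rw [PySem.Dict.contains_eq_isSome_get?, hget, PySem.Dict.contains_eq_isSome_get?]
      rw [hget, hcont, hcnt]
      simp [hp]

lemma trieBuild_getD (ws : List (List Char)) (q : List Char) (hq : q ≠ [])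
    (h1 : 1 ≤ cntPre q ws) :
    (trieBuild ws).getD q false = decide (2 ≤ cntPre q ws) := by
  have h0 : ¬ (cntPre q ws = 0) := by omega
  rw [PySem.Dict.getD_eq_get?_getD]
  show ((ws.foldl (fun d w => trieInsert d [] w) PySem.Dict.empty).get? q).getD false = _
  rw [buildFrom_get? ws PySem.Dict.empty q hq]
  simp [h0, PySem.Dict.contains_empty]

-- --- lcp characterisation ---
lemma take_prefix_iff_lcp (a : List Char) : ∀ (b : List Char) (k : Nat), k ≤ a.length →
    (a.take k <+: b ↔ k ≤ lcpLen a b) := by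
  induction a with
  | nil =>
    intro b k hk
    have hk0 : k = 0 := by simpa using hk
    subst hk0
    simp [lcpLen]
  | cons x a' ih =>
    intro b k hk
    cases k with
    | zero => simp
    | succ k' =>
      cases b with
      | nil => simp [lcpLen]
      | cons y b' =>
        simp only [List.take_succ_cons, List.cons_prefix_cons, lcpLen]
        by_cases hxy : x = y
        · rw [if_pos hxy, ih b' k' (by simpa using hk)]
          constructor
          · rintro ⟨_, h⟩; omega
          · intro h; exact ⟨hxy, by omega⟩
        · rw [if_neg hxy]
          constructor
          · rintro ⟨h, _⟩; exact absurd h hxy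
          · intro h; omega

lemma bestNat_eq_zero_or_mem (w : List Char) (others : List (List Char)) :
    bestNat w others = 0 ∨ ∃ v ∈ others, bestNat w others = lcpLen w v := by
  have hfold : bestNat w others = ((others.map (lcpLen w)).foldl max 0) := by
    rw [List.foldl_map]; rfl
  rcases PySem.List.foldl_max_mem (others.map (lcpLen w)) 0 with h | h
  · left; rw [hfold, h]
  · right
    rcases List.mem_map.mp h with ⟨v, hv, heq⟩
    exact ⟨v, hv, by rw [hfold, ← heq]⟩

lemma le_bestNat_iff (w : List Char) (others : List (List Char)) (k : Nat) (hk : 1 ≤ k) :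
    k ≤ bestNat w others ↔ ∃ v ∈ others, k ≤ lcpLen w v := by
  constructor
  · intro h
    rcases bestNat_eq_zero_or_mem w others with h0 | ⟨v, hv, heq⟩
    · omega
    · exact ⟨v, hv, heq ▸ h⟩
  · rintro ⟨v, hv, hle⟩
    exact le_trans hle ((PySem.List.le_foldl_max_nat others (lcpLen w) 0).2 v hv)

-- --- the per-word flag along w's own path ---
lemma flag_iff (t₁ t₂ : List (List Char)) (w : List Char) (k : Nat) (hk1 : 1 ≤ k)
    (hk2 : k ≤ w.length) :
    (trieBuild (t₁ ++ w :: t₂)).getD (w.take k) false =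
      decide (k ≤ bestNat w (t₁ ++ t₂)) := by
  have hw : w ≠ [] := by intro h; subst h; simp at hk2; omega
  have hq : w.take k ≠ [] := by
    intro h
    rw [List.take_eq_nil_iff] at h
    rcases h with h | h
    · omega
    · exact hw h
  have hself : (w.take k).isPrefixOf w := List.isPrefixOf_iff_prefix.mpr (List.take_prefix k w)
  have hcnt : cntPre (w.take k) (t₁ ++ w :: t₂) =
      cntPre (w.take k) t₁ + cntPre (w.take k) t₂ + 1 := by
    simp [cntPre, List.countP_append, hself]
    omega
  have h1 : 1 ≤ cntPre (w.take k) (t₁ ++ w :: t₂) := by omega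
  rw [trieBuild_getD _ _ hq h1, hcnt]
  have hiff : (2 ≤ cntPre (w.take k) t₁ + cntPre (w.take k) t₂ + 1) ↔
      (k ≤ bestNat w (t₁ ++ t₂)) := by
    rw [le_bestNat_iff w (t₁ ++ t₂) k hk1]
    constructor
    · intro h2
      have hpos : 0 < (t₁ ++ t₂).countP (fun v => (w.take k).isPrefixOf v) := by
        simp only [List.countP_append]
        simp only [cntPre] at h2 ⊢
        omega
      rcases List.countP_pos_iff.mp hpos with ⟨v, hv, hpv⟩
      exact ⟨v, hv, (take_prefix_iff_lcp w v k hk2).mp (List.isPrefixOf_iff_prefix.mp hpv)⟩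
    · rintro ⟨v, hv, hle⟩
      have hpv : (w.take k).isPrefixOf v := by
        rw [List.isPrefixOf_iff_prefix]
        exact (take_prefix_iff_lcp w v k hk2).mpr hle
      have hpos : 0 < (t₁ ++ t₂).countP (fun v => (w.take k).isPrefixOf v) :=
        List.countP_pos_iff.mpr ⟨v, hv, hpv⟩
      simp only [List.countP_append] at hpos
      simp only [cntPre]
      omega
  simp [hiff]

-- --- the query loop returns min len (best+1) ---
lemma trieQuery_main (t₁ t₂ : List (List Char)) (w : List Char) :
    ∀ (rest path : List Char) (i : Nat), path ++ rest = w → i = path.length →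
      i ≤ bestNat w (t₁ ++ t₂) →
      trieQuery (trieBuild (t₁ ++ w :: t₂)) path i rest =
        min w.length (bestNat w (t₁ ++ t₂) + 1) := by
  intro rest
  induction rest with
  | nil =>
    intro path i hpw hip hle
    have : path.length = w.length := by rw [← hpw]; simp
    show i = _
    omega
  | cons c rest' ih =>
    intro path i hpw hip hle
    have hlen : w.length = path.length + 1 + rest'.length := by
      rw [← hpw]; simp; omega
    have htake : w.take (i + 1) = path ++ [c] := by
      rw [← hpw, hip]
      have : path.length + 1 = (path ++ [c]).length := by simp
      rw [this]
      have : path ++ c :: rest' = (path ++ [c]) ++ rest' := by simp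
      rw [this, List.take_left]
    have hflag : (trieBuild (t₁ ++ w :: t₂)).getD (path ++ [c]) false =
        decide (i + 1 ≤ bestNat w (t₁ ++ t₂)) := by
      rw [← htake]
      exact flag_iff t₁ t₂ w (i + 1) (by omega) (by omega)
    show (if (trieBuild (t₁ ++ w :: t₂)).getD (path ++ [c]) false then
        trieQuery (trieBuild (t₁ ++ w :: t₂)) (path ++ [c]) (i + 1) rest' else i + 1) = _
    rw [hflag]
    by_cases hb : i + 1 ≤ bestNat w (t₁ ++ t₂)
    · rw [decide_eq_true hb]
      simp only [if_true]
      exact ih (path ++ [c]) (i + 1) (by simpa using hpw) (by simp [hip]) hb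
    · rw [decide_eq_false hb]
      simp only [Bool.false_eq_true, if_false]
      omega


-- --- lcp facts for the sorted sweep ---
lemma lcpLen_comm (a : List Char) : ∀ b, lcpLen a b = lcpLen b a := by
  induction a with
  | nil => intro b; cases b <;> simp [lcpLen]
  | cons x a' ih =>
    intro b
    cases b with
    | nil => simp [lcpLen]
    | cons y b' =>
      show (if x = y then lcpLen a' b' + 1 else 0) = (if y = x then lcpLen b' a' + 1 else 0)
      by_cases hxy : x = y
      · simp [hxy, ih b']
      · rw [if_neg hxy, if_neg (fun h => hxy (Eq.symm h))]

lemma cons_le_cons_lex (x y : Char) (a b : List Char) :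
    (x :: a) ≤ (y :: b) ↔ x < y ∨ (x = y ∧ a ≤ b) := by
  constructor
  · intro h
    rcases lt_or_eq_of_le h with h | h
    · have h' : List.Lex (· < ·) (x :: a) (y :: b) := h
      cases h' with
      | cons h'' => exact Or.inr ⟨rfl, le_of_lt h''⟩
      | rel h'' => exact Or.inl h''
    · injection h with h1 h2
      exact Or.inr ⟨h1, le_of_eq h2⟩
  · rintro (h | ⟨rfl, h⟩)
    · exact le_of_lt (List.Lex.rel h)
    · rcases lt_or_eq_of_le h with h' | h'
      · exact le_of_lt (List.Lex.cons h')
      · rw [h']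

lemma cons_not_le_nil (x : Char) (a : List Char) : ¬ (x :: a) ≤ ([] : List Char) := by
  intro h
  exact absurd (lt_of_lt_of_le (List.Lex.nil : ([] : List Char) < x :: a) h) (lt_irrefl _)

-- for a ≤ b ≤ c the middle word shares at least the a–c common prefix with both ends
lemma lcp_between (a : List Char) : ∀ (b c : List Char), a ≤ b → b ≤ c →
    lcpLen a c ≤ lcpLen a b ∧ lcpLen a c ≤ lcpLen b c := by
  induction a with
  | nil => intro b c _ _; simp [lcpLen]
  | cons x a' ih =>
    intro b c hab hbc
    cases c with
    | nil =>
      constructor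
      · simp [lcpLen]
      · cases b <;> simp [lcpLen]
    | cons z c' =>
      by_cases hxz : x = z
      · subst hxz
        cases b with
        | nil => exact absurd hab (cons_not_le_nil x a')
        | cons y b' =>
          rcases (cons_le_cons_lex x y a' b').mp hab with h1 | ⟨rfl, h1⟩
          · rcases (cons_le_cons_lex y x b' c').mp hbc with h2 | ⟨rfl, h2⟩
            · exact absurd (lt_trans h1 h2) (lt_irrefl _)
            · exact absurd h1 (lt_irrefl _)
          · rcases (cons_le_cons_lex x x b' c').mp hbc with h2 | ⟨_, h2⟩
            · exact absurd h2 (lt_irrefl _)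
            · have := ih b' c' h1 h2
              show lcpLen (x :: a') (x :: c') ≤ lcpLen (x :: a') (x :: b') ∧
                lcpLen (x :: a') (x :: c') ≤ lcpLen (x :: b') (x :: c')
              simp [lcpLen]
              omega
      · constructor <;> · show (if x = z then lcpLen a' c' + 1 else 0) ≤ _; simp [hxz]

-- --- bestNat only depends on the multiset of the other words ---
lemma bestNat_le_of_subset (w : List Char) (l1 l2 : List (List Char))
    (h : ∀ x ∈ l1, x ∈ l2) : bestNat w l1 ≤ bestNat w l2 := by
  rcases bestNat_eq_zero_or_mem w l1 with h0 | ⟨v, hv, heq⟩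
  · omega
  · rw [heq]
    exact (PySem.List.le_foldl_max_nat l2 (lcpLen w) 0).2 v (h v hv)

lemma bestNat_perm (w : List Char) (l1 l2 : List (List Char)) (h : l1.Perm l2) :
    bestNat w l1 = bestNat w l2 :=
  Nat.le_antisymm (bestNat_le_of_subset w l1 l2 (fun x hx => h.mem_iff.mp hx))
    (bestNat_le_of_subset w l2 l1 (fun x hx => h.mem_iff.mpr hx))

-- --- order facts inside a sorted list ---
lemma le_getLast_of_pairwise (u : List String)
    (hp : List.Pairwise (fun a b : String => a ≤ b) u) :
    ∀ x ∈ u, ∀ h : u ≠ [], x ≤ u.getLast h := by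
  induction u with
  | nil => intro x hx; simp at hx
  | cons a r ih =>
    intro x hx h
    rcases List.pairwise_cons.mp hp with ⟨ha, hr⟩
    cases r with
    | nil =>
      simp at hx
      subst hx
      simp
    | cons b r' =>
      rw [List.getLast_cons (by simp)]
      rcases List.mem_cons.mp hx with rfl | hx'
      · exact le_trans (ha _ List.mem_cons_self) (ih hr _ List.mem_cons_self (by simp))
      · exact ih hr x hx' (by simp)

lemma head_le_of_pairwise (v : List String)
    (hp : List.Pairwise (fun a b : String => a ≤ b) v) :
    ∀ x ∈ v, ∀ h : v ≠ [], v.head h ≤ x := by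
  intro x hx h
  cases v with
  | nil => simp at hx
  | cons a r =>
    rcases List.pairwise_cons.mp hp with ⟨ha, _⟩
    rcases List.mem_cons.mp hx with rfl | hx'
    · simp
    · exact ha x hx'

-- --- in a sorted split u ++ w :: v, the best LCP is attained at a neighbour of w ---
lemma bestNat_sorted_split (u v : List String) (w : String)
    (hp : List.Pairwise (fun a b : String => a ≤ b) (u ++ w :: v)) :
    bestNat w.toList ((u ++ v).map String.toList) =
      max (match u.getLast? with | some a => lcpLen w.toList a.toList | none => 0)
          (match v.head? with | some b => lcpLen w.toList b.toList | none => 0) := by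
  rcases List.pairwise_append.mp hp with ⟨hu, hwv, hcross⟩
  rcases List.pairwise_cons.mp hwv with ⟨hwle, hv⟩
  apply Nat.le_antisymm
  · rcases bestNat_eq_zero_or_mem w.toList ((u ++ v).map String.toList) with h0 | ⟨x, hx, heq⟩
    · rw [h0]; exact Nat.zero_le _
    · rcases List.mem_map.mp hx with ⟨y, hy, rfl⟩
      rcases List.mem_append.mp hy with hyu | hyv
      · have hne : u ≠ [] := by rintro rfl; simp at hyu
        have hlast := le_getLast_of_pairwise u hu y hyu hne
        have hlw : u.getLast hne ≤ w := hcross _ (List.getLast_mem hne) w List.mem_cons_self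
        have hb := lcp_between y.toList (u.getLast hne).toList w.toList
          (String.le_iff_toList_le.mp hlast) (String.le_iff_toList_le.mp hlw)
        rw [heq, lcpLen_comm w.toList y.toList]
        have : u.getLast? = some (u.getLast hne) := List.getLast?_eq_some_getLast hne
        rw [this]
        calc lcpLen y.toList w.toList ≤ lcpLen (u.getLast hne).toList w.toList := hb.2
          _ = lcpLen w.toList (u.getLast hne).toList := lcpLen_comm _ _
          _ ≤ _ := le_max_left _ _
      · have hne : v ≠ [] := by rintro rfl; simp at hyv
        have hhead := head_le_of_pairwise v hv y hyv hne
        have hwh : w ≤ v.head hne := hwle _ (List.head_mem hne)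
        have hb := lcp_between w.toList (v.head hne).toList y.toList
          (String.le_iff_toList_le.mp hwh) (String.le_iff_toList_le.mp hhead)
        rw [heq]
        have : v.head? = some (v.head hne) := List.head?_eq_some_head hne
        rw [this]
        exact le_trans hb.1 (le_max_right _ _)
  · apply Nat.max_le.mpr
    constructor
    · cases hu' : u.getLast? with
      | none => exact Nat.zero_le _
      | some a =>
        have ha : a ∈ u := List.mem_of_getLast? hu'
        exact (PySem.List.le_foldl_max_nat ((u ++ v).map String.toList) (lcpLen w.toList) 0).2
          a.toList (List.mem_map.mpr ⟨a, List.mem_append.mpr (Or.inl ha), rfl⟩)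
    · cases hv' : v.head? with
      | none => exact Nat.zero_le _
      | some b =>
        have hb : b ∈ v := List.mem_of_mem_head? hv'
        exact (PySem.List.le_foldl_max_nat ((u ++ v).map String.toList) (lcpLen w.toList) 0).2
          b.toList (List.mem_map.mpr ⟨b, List.mem_append.mpr (Or.inr hb), rfl⟩)

-- one word's contribution: min(len, best-LCP-with-any-other-occurrence + 1)
def contrib (words : List String) (w : String) : Nat :=
  min w.toList.length (bestNat w.toList ((words.erase w).map String.toList) + 1)

lemma erase_split_perm (t₁ t₂ : List String) (w : String) :
    ((t₁ ++ w :: t₂).erase w).Perm (t₁ ++ t₂) := by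
  have h1 : (t₁ ++ w :: t₂).Perm (w :: (t₁ ++ t₂)) := List.perm_middle
  have h2 := h1.erase w
  rwa [List.erase_cons_head] at h2

-- one word's trie query equals its contribution
lemma per_index (t₁ t₂ : List String) (w : String) :
    trieQuery (trieBuild ((t₁ ++ w :: t₂).map String.toList)) [] 0 w.toList
      = contrib (t₁ ++ w :: t₂) w := by
  have hmap : (t₁ ++ w :: t₂).map String.toList
      = t₁.map String.toList ++ w.toList :: t₂.map String.toList := by simp
  rw [hmap, trieQuery_main (t₁.map String.toList) (t₂.map String.toList) w.toList w.toList [] 0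
      (by simp) rfl (Nat.zero_le _)]
  unfold contrib
  have hperm : (((t₁ ++ w :: t₂).erase w).map String.toList).Perm
      (t₁.map String.toList ++ t₂.map String.toList) := by
    have := (erase_split_perm t₁ t₂ w).map String.toList
    simpa using this
  rw [bestNat_perm w.toList _ _ hperm.symm]

-- A's sum, re-indexed as a sum of contributions
lemma A_sum (words : List String) :
    words.foldl
      (fun acc w => acc + trieQuery (trieBuild (words.map String.toList)) [] 0 w.toList) 0
      = (words.map (contrib words)).sum := by
  rw [PySem.List.foldl_add_nat]
  simp only [Nat.zero_add]
  congr 1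
  apply List.ext_getElem
  · simp
  · intro n h1 h2
    have hn : n < words.length := by simpa using h1
    simp only [List.getElem_map]
    obtain ⟨t₁, t₂, w, hsplit, ht1, hw⟩ :
        ∃ t₁ t₂ w, words = t₁ ++ w :: t₂ ∧ t₁.length = n ∧ words[n] = w := by
      refine ⟨words.take n, words.drop (n + 1), words[n], ?_, by simp; omega, rfl⟩
      conv_lhs => rw [← List.take_append_drop n words, List.drop_eq_getElem_cons hn]
    rw [hw]
    conv_lhs => rw [hsplit]
    conv_rhs => rw [hsplit]
    exact per_index t₁ t₂ w

-- the j-th adjacent LCP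
lemma adjLcps_getElem (s : List String) (j : Nat) (hj : j + 1 < s.length)
    (h : j < (adjLcps s).length) :
    (adjLcps s)[j] = lcpLen (s[j]'(by omega)).toList (s[j + 1]'hj).toList := by
  unfold adjLcps
  simp only [List.getElem_map, List.getElem_zip, List.getElem_tail]

lemma length_adjLcps (s : List String) : (adjLcps s).length = s.length - 1 := by
  simp [adjLcps]

-- B's sum over the sorted list, element by element
lemma B_sum (words s : List String) (hp : List.Pairwise (fun a b : String => a ≤ b) s)
    (hperm : s.Perm words) :
    (s.zip (List.zipWith max (0 :: adjLcps s) (adjLcps s ++ [0]))).foldl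
      (fun total p => total + min p.1.toList.length (p.2 + 1)) 0
    = (s.map (contrib words)).sum := by
  rw [PySem.List.foldl_add_nat]
  simp only [Nat.zero_add]
  congr 1
  have hadj := length_adjLcps s
  apply List.ext_getElem
  · simp [length_adjLcps]
    omega
  · intro k h1 h2
    have hk : k < s.length := by simpa using h2
    simp only [List.getElem_map, List.getElem_zip, List.getElem_zipWith]
    obtain ⟨u, v, w, hsplit, hu, hw⟩ :
        ∃ u v w, s = u ++ w :: v ∧ u.length = k ∧ s[k] = w := by
      refine ⟨s.take k, s.drop (k + 1), s[k], ?_, by simp; omega, rfl⟩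
      conv_lhs => rw [← List.take_append_drop k s, List.drop_eq_getElem_cons hk]
    have hslen : s.length = k + 1 + v.length := by rw [hsplit]; simp; omega
    have hbest : bestNat (s[k]).toList ((words.erase s[k]).map String.toList) =
        max (match u.getLast? with | some a => lcpLen (s[k]).toList a.toList | none => 0)
            (match v.head? with | some b => lcpLen (s[k]).toList b.toList | none => 0) := by
      have hperm2 : ((words.erase s[k]).map String.toList).Perm ((u ++ v).map String.toList) := by
        apply List.Perm.map
        have e1 : (words.erase s[k]).Perm (s.erase s[k]) := (hperm.erase s[k]).symm
        have e2 : s.erase s[k] = (u ++ w :: v).erase w := by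
          rw [hw]
          conv_lhs => rw [hsplit]
        exact e1.trans (e2 ▸ erase_split_perm u v w)
      rw [bestNat_perm _ _ _ hperm2, hw]
      exact bestNat_sorted_split u v w (hsplit ▸ hp)
    rw [show contrib words s[k] = min s[k].toList.length
        (bestNat s[k].toList ((words.erase s[k]).map String.toList) + 1) from rfl, hbest]
    -- the zipWith max element equals the neighbour max
    congr 1
    congr 1
    congr 1
    · -- left neighbour
      cases k with
      | zero =>
        have hu0 : u = [] := List.length_eq_zero_iff.mp hu
        subst hu0
        simp
      | succ j =>
        have hune : u ≠ [] := by intro h0; rw [h0] at hu; simp at hu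
        have hju : j < u.length := by omega
        have hlast : u.getLast? = some (u[j]'hju) := by
          rw [List.getLast?_eq_getElem?, hu]
          simp only [Nat.add_sub_cancel]
          exact List.getElem?_eq_getElem hju
        have hsj : s[j]'(by omega) = u[j]'hju := by
          rw [List.getElem_of_eq hsplit (by omega)]
          exact List.getElem_append_left hju
        have hsj1 : s[j + 1]'(by omega) = w := hw
        rw [hlast]
        have hje : j < (adjLcps s).length := by omega
        rw [List.getElem_cons_succ, adjLcps_getElem s j (by omega) hje, hsj, hsj1]
        exact lcpLen_comm _ _
    · -- right neighbour
      by_cases hend : k + 1 < s.length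
      · have hv0 : 0 < v.length := by omega
        have hh : v.head? = some (v[0]'hv0) := by
          rw [List.head?_eq_getElem?]
          exact List.getElem?_eq_getElem hv0
        have hsk1 : s[k + 1]'hend = v[0]'hv0 := by
          rw [List.getElem_of_eq hsplit (by omega)]
          rw [List.getElem_append_right (by omega)]
          simp [hu]
        rw [hh]
        have hke : k < (adjLcps s).length := by omega
        rw [List.getElem_append_left hke, adjLcps_getElem s k hend hke, hw, hsk1]
      · have hv0 : v = [] := by
          rw [List.length_eq_zero_iff.symm]
          omega
        subst hv0
        simp only [List.head?_nil]
        have hke : ¬ k < (adjLcps s).length := by omega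
        rw [List.getElem_append_right (by omega)]
        simp

-- the two programs' numeric results agree
lemma main_eq (words : List String) :
    words.foldl
      (fun acc w => acc + trieQuery (trieBuild (words.map String.toList)) [] 0 w.toList) 0
    = ((PySem.List.sorted words (fun x => x) false).zip
        (List.zipWith max (0 :: adjLcps (PySem.List.sorted words (fun x => x) false))
          (adjLcps (PySem.List.sorted words (fun x => x) false) ++ [0]))).foldl
        (fun total p => total + min p.1.toList.length (p.2 + 1)) 0 := by
  rw [A_sum, B_sum words (PySem.List.sorted words (fun x => x) false)
    (by simpa using PySem.List.sorted_pairwise words (fun x => x))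
    (PySem.List.sorted_perm words (fun x => x) false)]
  exact (((PySem.List.sorted_perm words (fun x => x) false).map (contrib words)).sum_eq).symm

-- ===== VERDICT (by name: the statement is the Claim_ definition above) =====
theorem solution_spec : Claim_equal_solution := by
  intro words _
  show solution words = solution_alt words
  simp only [solution, solution_alt]
  exact_mod_cast main_eq words
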